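-- pv_equiv track=rewrite | github.com/aidangollan/SnakeAI | Snake AI/util.py | distance_wall
-- ===== SOURCE A (Python) =====
-- import copy
--
-- def distance_wall(snake_cords, max_x, max_y, dir):
--     new_cords = copy.deepcopy(snake_cords)
--     i = -1
--     while 0 <= new_cords[0] <= max_x and 0 <= new_cords[1] <= max_y:
--         new_cords[0] += dir[0] * 50
--         new_cords[1] += dir[1] * 50
--         i += 1
--     return i * 50
-- ===== SOURCE B (Python) =====
-- def distance_wall(snake_cords, max_x, max_y, dir):
--     x, y = snake_cords[0], snake_cords[1]
--     if not (0 <= x <= max_x and 0 <= y <= max_y):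
--         return -50
--     dx, dy = dir[0], dir[1]
--
--     def steps(pos, d, hi):
--         # first k >= 1 with pos + 50*d*k outside [0, hi]; None if d == 0
--         if d > 0:
--             return (hi - pos) // (50 * d) + 1
--         if d < 0:
--             return pos // (-50 * d) + 1
--         return None
--
--     k = min(s for s in (steps(x, dx, max_x), steps(y, dy, max_y)) if s is not None)
--     return (k - 1) * 50
-- ===== Notes on version B (the rewrite author's own statement) =====
-- stated objective: faster
-- what changed: Replaces A's step-by-step walk of the point in 50-pixel increments with a closed-form per-axis floor division counting the steps to the boundary, taking the minimum over the active axes.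
-- outside the precondition, e.g. on distance_wall([5], 3, 3, [1, 0]): A returns -50, B raises IndexError
import Mathlib
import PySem

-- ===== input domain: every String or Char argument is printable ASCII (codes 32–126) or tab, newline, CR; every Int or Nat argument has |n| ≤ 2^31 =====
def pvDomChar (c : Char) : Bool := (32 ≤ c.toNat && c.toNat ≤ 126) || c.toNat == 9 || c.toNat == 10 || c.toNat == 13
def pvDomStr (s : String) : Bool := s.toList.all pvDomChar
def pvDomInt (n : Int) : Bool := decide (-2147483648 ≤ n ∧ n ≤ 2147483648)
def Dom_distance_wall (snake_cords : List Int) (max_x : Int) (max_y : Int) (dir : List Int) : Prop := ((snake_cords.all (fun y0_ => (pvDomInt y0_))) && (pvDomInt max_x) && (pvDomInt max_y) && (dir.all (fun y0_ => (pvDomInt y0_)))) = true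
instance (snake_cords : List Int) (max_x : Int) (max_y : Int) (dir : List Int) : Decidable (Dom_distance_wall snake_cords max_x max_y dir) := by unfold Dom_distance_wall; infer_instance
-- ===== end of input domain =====

-- B replaces A's step-by-step walk (O(distance/50) iterations) by a closed-form per-axis
-- floor division counting the steps to the boundary (O(1)).

-- ===== PORT A =====
-- A's while loop; `fuel` is an upper bound on the number of iterations, sufficient under Pre_
def loopA (mx my dx dy : Int) : Nat → Int → Int → Int → Int
  | 0, _, _, i => i * 50
  | f+1, x, y, i =>
    if 0 ≤ x ∧ x ≤ mx ∧ 0 ≤ y ∧ y ≤ my then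
      loopA mx my dx dy f (x + dx * 50) (y + dy * 50) (i + 1)
    else i * 50

def distance_wall (snake_cords : List Int) (max_x : Int) (max_y : Int) (dir : List Int) : Int :=
  -- Pre_ guarantees the indexed accesses are in range, so `.getD 0` is never taken on none
  let x := (PySem.List.pyGet? snake_cords 0).getD 0
  let y := (PySem.List.pyGet? snake_cords 1).getD 0
  let dx := (PySem.List.pyGet? dir 0).getD 0
  let dy := (PySem.List.pyGet? dir 1).getD 0
  let fuel := (max_x - x).natAbs + x.natAbs + (max_y - y).natAbs + y.natAbs + 2
  loopA max_x max_y dx dy fuel x y (-1)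

-- ===== PORT B =====
-- first k ≥ 1 with pos + 50*d*k outside [0, hi]; none if d = 0
def stepsB (pos d hi : Int) : Option Int :=
  if 0 < d then some (PySem.Int.floordiv (hi - pos) (50 * d) + 1)
  else if d < 0 then some (PySem.Int.floordiv pos (-50 * d) + 1)
  else none

def distance_wall_alt (snake_cords : List Int) (max_x : Int) (max_y : Int) (dir : List Int) : Int :=
  let x := (PySem.List.pyGet? snake_cords 0).getD 0
  let y := (PySem.List.pyGet? snake_cords 1).getD 0
  if 0 ≤ x ∧ x ≤ max_x ∧ 0 ≤ y ∧ y ≤ max_y then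
    let dx := (PySem.List.pyGet? dir 0).getD 0
    let dy := (PySem.List.pyGet? dir 1).getD 0
    let k := match stepsB x dx max_x, stepsB y dy max_y with
      | some a, some b => min a b
      | some a, none => a
      | none, some b => b
      | none, none => 0
    (k - 1) * 50
  else -50

-- ===== PRECONDITION & SPEC =====
-- Pre_ excludes: snake_cords shorter than 2 (A raises IndexError except when the first
-- coordinate is already out of range, where short-circuiting lets A return -50 while B's
-- unconditional read of snake_cords[1] raises), and — when the start is inside the box —
-- dir shorter than 2 (IndexError) or dir = [0, 0] (A loops forever).
def Pre_distance_wall (snake_cords : List Int) (max_x : Int) (max_y : Int) (dir : List Int) : Prop :=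
  2 ≤ snake_cords.length ∧
  ((0 ≤ (PySem.List.pyGet? snake_cords 0).getD 0 ∧ (PySem.List.pyGet? snake_cords 0).getD 0 ≤ max_x ∧
    0 ≤ (PySem.List.pyGet? snake_cords 1).getD 0 ∧ (PySem.List.pyGet? snake_cords 1).getD 0 ≤ max_y) →
    (2 ≤ dir.length ∧
     ¬((PySem.List.pyGet? dir 0).getD 0 = 0 ∧ (PySem.List.pyGet? dir 1).getD 0 = 0)))
instance (snake_cords : List Int) (max_x : Int) (max_y : Int) (dir : List Int) : Decidable (Pre_distance_wall snake_cords max_x max_y dir) := by unfold Pre_distance_wall; infer_instance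

def pvWitness_distance_wall : List Int × Int × Int × List Int := ([100, 50], 200, 200, [1, -1])

def Spec_distance_wall (snake_cords : List Int) (max_x : Int) (max_y : Int) (dir : List Int) (out : Int) : Prop := out = distance_wall_alt snake_cords max_x max_y dir
instance (snake_cords : List Int) (max_x : Int) (max_y : Int) (dir : List Int) (out : Int) : Decidable (Spec_distance_wall snake_cords max_x max_y dir out) := by unfold Spec_distance_wall; infer_instance

-- ===== CLAIM (what is proved, stated in full; the proofs are below) =====
def Claim_equal_distance_wall : Prop := ∀ (snake_cords : List Int) (max_x : Int) (max_y : Int) (dir : List Int), Dom_distance_wall snake_cords max_x max_y dir → Pre_distance_wall snake_cords max_x max_y dir → Spec_distance_wall snake_cords max_x max_y dir (distance_wall snake_cords max_x max_y dir)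

-- ===== LEMMAS AND PROOFS =====

-- the loop runs exactly k iterations when the position is in the box for the first k
-- multiples of the step and out of it at the k-th
lemma loopA_run (mx my dx dy : Int) :
    ∀ (k fuel : Nat) (x y i : Int), k ≤ fuel →
    (∀ j : Nat, j < k → 0 ≤ x + dx * 50 * (j : Int) ∧ x + dx * 50 * (j : Int) ≤ mx ∧
                        0 ≤ y + dy * 50 * (j : Int) ∧ y + dy * 50 * (j : Int) ≤ my) →
    ¬(0 ≤ x + dx * 50 * (k : Int) ∧ x + dx * 50 * (k : Int) ≤ mx ∧
      0 ≤ y + dy * 50 * (k : Int) ∧ y + dy * 50 * (k : Int) ≤ my) →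
    loopA mx my dx dy fuel x y i = (i + k) * 50 := by
  intro k
  induction k with
  | zero =>
    intro fuel x y i _ _ hstop
    simp only [Nat.cast_zero, mul_zero, add_zero] at hstop
    cases fuel with
    | zero => simp [loopA]
    | succ f => simp [loopA, hstop]
  | succ k ih =>
    intro fuel x y i hle hrun hstop
    cases fuel with
    | zero => omega
    | succ f =>
      have h0 := hrun 0 (Nat.succ_pos k)
      simp only [Nat.cast_zero, mul_zero, add_zero] at h0
      simp only [loopA, if_pos h0]
      have := ih f (x + dx * 50) (y + dy * 50) (i + 1) (by omega)
        (fun j hj => by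
          have := hrun (j + 1) (by omega)
          push_cast at this ⊢
          constructor; · linarith [this.1]
          constructor; · linarith [this.2.1]
          constructor; · linarith [this.2.2.1]
          · linarith [this.2.2.2])
        (by
          intro hc
          apply hstop
          push_cast at hc ⊢
          refine ⟨by linarith [hc.1], by linarith [hc.2.1], by linarith [hc.2.2.1], by linarith [hc.2.2.2]⟩)
      rw [this]; push_cast; ring

-- per-axis characterisation of B's closed form
lemma stepsB_spec (pos d hi : Int) (h0 : 0 ≤ pos) (h1 : pos ≤ hi) (hd : d ≠ 0) :
    ∃ k : Int, stepsB pos d hi = some k ∧ 1 ≤ k ∧ k ≤ hi + 1 ∧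
      (∀ j : Int, 0 ≤ j → j < k → 0 ≤ pos + d * 50 * j ∧ pos + d * 50 * j ≤ hi) ∧
      ¬(0 ≤ pos + d * 50 * k ∧ pos + d * 50 * k ≤ hi) := by
  rcases lt_or_gt_of_ne hd with hneg | hpos
  · -- d < 0 : steps down, leaves through 0
    have hb : (0:Int) < -50 * d := by linarith
    set q := PySem.Int.floordiv pos (-50 * d) with hq
    have hdecomp := PySem.Int.floordiv_mul_add_mod pos (-50 * d)
    have hr0 := PySem.Int.mod_nonneg pos hb
    have hrlt := PySem.Int.mod_lt pos hb
    refine ⟨q + 1, ?_, ?_, ?_, ?_, ?_⟩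
    · simp [stepsB, hneg, not_lt.mpr (le_of_lt hneg), hq]
    · -- q ≥ 0 since pos ≥ 0
      nlinarith [hdecomp, hr0, hrlt]
    · nlinarith [hdecomp, hr0, hrlt]
    · intro j hj0 hjk
      have hjq : j ≤ q := by omega
      have : d * 50 * q ≤ d * 50 * j := by nlinarith
      constructor
      · nlinarith [hdecomp, hr0]
      · nlinarith
    · intro ⟨hlo, _⟩
      nlinarith [hdecomp, hrlt]
  · -- d > 0 : steps up, leaves through hi
    have hb : (0:Int) < 50 * d := by linarith
    set q := PySem.Int.floordiv (hi - pos) (50 * d) with hq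
    have hdecomp := PySem.Int.floordiv_mul_add_mod (hi - pos) (50 * d)
    have hr0 := PySem.Int.mod_nonneg (hi - pos) hb
    have hrlt := PySem.Int.mod_lt (hi - pos) hb
    refine ⟨q + 1, ?_, ?_, ?_, ?_, ?_⟩
    · simp [stepsB, hpos, hq]
    · nlinarith [hdecomp, hr0, hrlt]
    · nlinarith [hdecomp, hr0, hrlt]
    · intro j hj0 hjk
      have hjq : j ≤ q := by omega
      have : d * 50 * j ≤ d * 50 * q := by nlinarith
      constructor
      · nlinarith
      · nlinarith [hdecomp, hr0]
    · intro ⟨_, hhi⟩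
      nlinarith [hdecomp, hrlt]

-- ===== VERDICT (by name: the statement is the Claim_ definition above) =====
theorem distance_wall_spec : Claim_equal_distance_wall := by
  intro sc mx my dir _ hPre
  obtain ⟨hlen, hdir⟩ := hPre
  unfold Spec_distance_wall distance_wall distance_wall_alt
  set x := (PySem.List.pyGet? sc 0).getD 0 with hx
  set y := (PySem.List.pyGet? sc 1).getD 0 with hy
  set dx := (PySem.List.pyGet? dir 0).getD 0 with hdx
  set dy := (PySem.List.pyGet? dir 1).getD 0 with hdy
  by_cases hin : 0 ≤ x ∧ x ≤ mx ∧ 0 ≤ y ∧ y ≤ my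
  · obtain ⟨_, hnz⟩ := hdir hin
    obtain ⟨hx0, hxm, hy0, hym⟩ := hin
    simp only [if_pos (show 0 ≤ x ∧ x ≤ mx ∧ 0 ≤ y ∧ y ≤ my from ⟨hx0, hxm, hy0, hym⟩)]
    -- combined exit step k
    have key : ∃ k : Int, (match stepsB x dx mx, stepsB y dy my with
        | some a, some b => min a b
        | some a, none => a
        | none, some b => b
        | none, none => 0) = k ∧ 1 ≤ k ∧ k ≤ mx + my + 2 ∧
        (∀ j : Int, 0 ≤ j → j < k →
          0 ≤ x + dx * 50 * j ∧ x + dx * 50 * j ≤ mx ∧ 0 ≤ y + dy * 50 * j ∧ y + dy * 50 * j ≤ my) ∧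
        ¬(0 ≤ x + dx * 50 * k ∧ x + dx * 50 * k ≤ mx ∧ 0 ≤ y + dy * 50 * k ∧ y + dy * 50 * k ≤ my) := by
      by_cases hdx0 : dx = 0
      · have hdy0 : dy ≠ 0 := fun h => hnz ⟨hdx0, h⟩
        obtain ⟨ky, hky, hky1, hkyb, hkyrun, hkystop⟩ := stepsB_spec y dy my hy0 hym hdy0
        refine ⟨ky, ?_, hky1, by omega, ?_, ?_⟩
        · rw [hky]; simp [stepsB, hdx0]
        · intro j hj0 hjk
          have := hkyrun j hj0 hjk
          exact ⟨by simp [hdx0]; omega, by simp [hdx0]; omega, this.1, this.2⟩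
        · intro hc; exact hkystop ⟨hc.2.2.1, hc.2.2.2⟩
      · by_cases hdy0 : dy = 0
        · obtain ⟨kx, hkx, hkx1, hkxb, hkxrun, hkxstop⟩ := stepsB_spec x dx mx hx0 hxm hdx0
          refine ⟨kx, ?_, hkx1, by omega, ?_, ?_⟩
          · rw [hkx]; simp [stepsB, hdy0]
          · intro j hj0 hjk
            have := hkxrun j hj0 hjk
            exact ⟨this.1, this.2, by simp [hdy0]; omega, by simp [hdy0]; omega⟩
          · intro hc; exact hkxstop ⟨hc.1, hc.2.1⟩
        · obtain ⟨kx, hkx, hkx1, hkxb, hkxrun, hkxstop⟩ := stepsB_spec x dx mx hx0 hxm hdx0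
          obtain ⟨ky, hky, hky1, hkyb, hkyrun, hkystop⟩ := stepsB_spec y dy my hy0 hym hdy0
          refine ⟨min kx ky, ?_, by omega, by omega, ?_, ?_⟩
          · rw [hkx, hky]
          · intro j hj0 hjk
            have h1 := hkxrun j hj0 (lt_of_lt_of_le hjk (min_le_left _ _))
            have h2 := hkyrun j hj0 (lt_of_lt_of_le hjk (min_le_right _ _))
            exact ⟨h1.1, h1.2, h2.1, h2.2⟩
          · intro hc
            rcases le_total kx ky with hle | hle
            · rw [min_eq_left hle] at hc; exact hkxstop ⟨hc.1, hc.2.1⟩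
            · rw [min_eq_right hle] at hc; exact hkystop ⟨hc.2.2.1, hc.2.2.2⟩
    obtain ⟨k, hkeq, hk1, hkb, hkrun, hkstop⟩ := key
    rw [hkeq]
    have hkt : ((k.toNat : Int)) = k := Int.toNat_of_nonneg (by omega)
    have hfuel : k.toNat ≤ (mx - x).natAbs + x.natAbs + (my - y).natAbs + y.natAbs + 2 := by omega
    rw [loopA_run mx my dx dy k.toNat _ x y (-1) hfuel
      (fun j hj => hkrun j (by positivity) (by omega))
      (by rw [hkt]; exact hkstop)]
    rw [hkt]; ring
  · simp only [if_neg hin]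
    have : (mx - x).natAbs + x.natAbs + (my - y).natAbs + y.natAbs + 2
         = ((mx - x).natAbs + x.natAbs + (my - y).natAbs + y.natAbs + 1) + 1 := by omega
    rw [this]
    simp [loopA, hin]
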